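-- pv_equiv track=rewrite | github.com/ArtemHelloWorld/algorithms | yandex/31 - замениить %20 на пробел.py | func
-- ===== SOURCE A (Python) =====
-- def func(s: str) -> str:
--     """Два указателя | Время О(N) | Память O(N)"""
--     if len(s) < 3:
--         return s
--
--     ans = []
--     l = 0
--     r = l + 2
--     while r < len(s):
--         if s[l:r+1] == '%20':
--             ans.append(' ')
--             l += 3
--             r += 3
--         else:
--             ans.append(s[l])
--             l += 1
--             r += 1
--
--     while l < len(s):
--         ans.append(s[l])
--         l += 1
--
--     return ''.join(ans)
-- ===== SOURCE B (Python) =====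
-- def func(s: str) -> str:
--     """Split on '%20' and join with spaces | O(N)"""
--     return ' '.join(s.split('%20'))
-- ===== Notes on version B (the rewrite author's own statement) =====
-- stated objective: simpler
-- what changed: Replaces the manual two-pointer scan with result list by splitting the string on the literal delimiter and joining the segments with single spaces (one library split/join pass instead of an index loop), dropping the short-string guard.
import Mathlib
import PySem

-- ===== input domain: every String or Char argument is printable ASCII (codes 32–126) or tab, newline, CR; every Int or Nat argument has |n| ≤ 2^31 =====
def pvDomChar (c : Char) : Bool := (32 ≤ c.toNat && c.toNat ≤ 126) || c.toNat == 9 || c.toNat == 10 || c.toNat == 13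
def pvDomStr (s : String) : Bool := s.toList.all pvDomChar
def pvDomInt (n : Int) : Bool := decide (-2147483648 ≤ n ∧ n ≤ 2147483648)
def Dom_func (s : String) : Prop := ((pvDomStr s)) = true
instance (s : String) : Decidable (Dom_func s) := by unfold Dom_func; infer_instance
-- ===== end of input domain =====

-- B replaces A's two-pointer index loop by split-on-'%20' then join-with-space (simpler decomposition, same O(n) cost).

-- ===== PORT A =====
-- A's main loop: while r < len(s) with r = l + 2; returns (appended chars, final l).
def funcLoop (cs : List Char) (l : Nat) : List Char × Nat :=
  if h : l + 2 < cs.length then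
    if PySem.List.slice cs (some (l : Int)) (some ((l : Int) + 3)) = ['%', '2', '0'] then
      (' ' :: (funcLoop cs (l + 3)).1, (funcLoop cs (l + 3)).2)
    else
      (cs[l]'(by omega) :: (funcLoop cs (l + 1)).1, (funcLoop cs (l + 1)).2)
  else ([], l)
termination_by cs.length - l

-- A's second loop: while l < len(s): ans.append(s[l]); l += 1
def funcTail (cs : List Char) (l : Nat) : List Char :=
  if h : l < cs.length then cs[l] :: funcTail cs (l + 1) else []
termination_by cs.length - l

def func (s : String) : String :=
  if s.toList.length < 3 then s
  else String.ofList ((funcLoop s.toList 0).1 ++ funcTail s.toList (funcLoop s.toList 0).2)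

-- ===== PORT B =====
-- s.split('%20') (leftmost, non-overlapping)
def splitOn20 : List Char → List (List Char)
  | [] => [[]]
  | c :: t =>
    if c = '%' ∧ t.take 2 = ['2', '0'] then [] :: splitOn20 (t.drop 2)
    else
      match splitOn20 t with
      | [] => [[c]]
      | h :: r => (c :: h) :: r
termination_by cs => cs.length
decreasing_by all_goals (simp; try omega)

-- ' '.join(parts)
def joinSp : List (List Char) → List Char
  | [] => []
  | x :: r => x ++ (if r = [] then [] else ' ' :: joinSp r)

def func_alt (s : String) : String := String.ofList (joinSp (splitOn20 s.toList))

-- ===== PRECONDITION & SPEC =====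
def Spec_func (s : String) (out : String) : Prop := out = func_alt s
instance (s : String) (out : String) : Decidable (Spec_func s out) := by unfold Spec_func; infer_instance

-- ===== CLAIM (what is proved, stated in full; the proofs are below) =====
def Claim_equal_func : Prop := ∀ (s : String), Dom_func s → Spec_func s (func s)

-- ===== LEMMAS AND PROOFS =====

-- canonical replacement: both programs compute this
def repl : List Char → List Char
  | [] => []
  | c :: t =>
    if c = '%' ∧ t.take 2 = ['2', '0'] then ' ' :: repl (t.drop 2) else c :: repl t
termination_by cs => cs.length
decreasing_by all_goals (simp; try omega)

lemma repl_short (cs : List Char) (h : cs.length < 3) : repl cs = cs := by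
  match cs with
  | [] => simp [repl]
  | [a] => simp [repl]
  | [a, b] =>
    simp only [repl, List.take, List.drop]
    by_cases ha : a = '%' ∧ [b].take 2 = ['2', '0'] <;> simp_all
  | a :: b :: c :: t => exact absurd h (by simp)

lemma funcTail_eq_drop (cs : List Char) (l : Nat) : funcTail cs l = cs.drop l := by
  rw [funcTail]
  split
  · next h =>
    rw [funcTail_eq_drop cs (l + 1), List.drop_eq_getElem_cons h]
  · next h => rw [List.drop_eq_nil_of_le (by omega)]
termination_by cs.length - l

lemma funcLoop_eq (cs : List Char) (l : Nat) :
    (funcLoop cs l).1 ++ funcTail cs (funcLoop cs l).2 = repl (cs.drop l) := by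
  rw [funcLoop]
  split
  · next h =>
    have hd : cs.drop l = cs[l] :: cs[l+1] :: cs[l+2] :: cs.drop (l + 3) := by
      rw [List.drop_eq_getElem_cons (by omega : l < cs.length),
          List.drop_eq_getElem_cons (by omega : l + 1 < cs.length),
          List.drop_eq_getElem_cons (by omega : l + 2 < cs.length)]
    have hd1 : cs.drop (l + 1) = cs[l+1] :: cs[l+2] :: cs.drop (l + 3) := by
      rw [List.drop_eq_getElem_cons (by omega : l + 1 < cs.length),
          List.drop_eq_getElem_cons (by omega : l + 2 < cs.length)]
    have hs : PySem.List.slice cs (some (l : Int)) (some ((l : Int) + 3)) =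
        [cs[l], cs[l+1], cs[l+2]] := by
      have h2 := PySem.List.slice_natCast_add (xs := cs) (j := l) (n := 3)
      push_cast at h2
      rw [h2, hd]
      rfl
    rw [hs]
    split
    · next heq =>
      have h1 : cs[l] = '%' := by injection heq
      have h2 : cs[l+1] = '2' := by injection heq with _ heq'; injection heq'
      have h3 : cs[l+2] = '0' := by
        injection heq with _ heq'; injection heq' with _ heq''; injection heq''
      rw [hd, repl, if_pos ⟨h1, by simp [h2, h3]⟩]
      simp only [List.cons_append, List.drop_succ_cons, List.drop_zero]
      exact congrArg (List.cons ' ') (funcLoop_eq cs (l + 3))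
    · next hne =>
      rw [hd, repl]
      rw [if_neg ?hcond]
      case hcond =>
        rintro ⟨h1, h2⟩
        have h2' : [cs[l+1], cs[l+2]] = ['2', '0'] := h2
        have e1 : cs[l+1] = '2' := by injection h2'
        have e2 : cs[l+2] = '0' := by injection h2' with _ hb; injection hb
        exact hne (by rw [h1, e1, e2])
      have ih := funcLoop_eq cs (l + 1)
      rw [hd1] at ih
      simpa using ih
  · next h =>
    simp only [List.nil_append]
    rw [funcTail_eq_drop, repl_short]
    simp; omega
termination_by cs.length - l

lemma splitOn20_ne_nil (cs : List Char) : splitOn20 cs ≠ [] := by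
  rw [splitOn20.eq_def]
  split
  · simp
  · split
    · simp
    · split <;> simp

lemma joinSp_split_eq_repl (cs : List Char) : joinSp (splitOn20 cs) = repl cs := by
  match cs with
  | [] => simp [splitOn20, repl, joinSp]
  | c :: t =>
    rw [splitOn20, repl]
    by_cases hc : c = '%' ∧ t.take 2 = ['2', '0']
    · rw [if_pos hc, if_pos hc]
      have hne := splitOn20_ne_nil (t.drop 2)
      have ih := joinSp_split_eq_repl (t.drop 2)
      simp [joinSp, hne, ih]
    · rw [if_neg hc, if_neg hc]
      have hne := splitOn20_ne_nil t
      have ih := joinSp_split_eq_repl t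
      match hsp : splitOn20 t with
      | [] => exact absurd hsp hne
      | h :: r =>
        rw [hsp] at ih
        simp only [joinSp] at ih ⊢
        split at ih <;> simp_all
termination_by cs.length
decreasing_by all_goals (simp; try omega)

-- ===== VERDICT (by name: the statement is the Claim_ definition above) =====
theorem func_spec : Claim_equal_func := by
  intro s _
  unfold Spec_func func func_alt
  rw [joinSp_split_eq_repl]
  by_cases h : s.toList.length < 3
  · rw [if_pos h, repl_short _ h]
    simp
  · rw [if_neg h, funcLoop_eq]
    simp
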